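-- pv_equiv track=rewrite | github.com/DevGuyRash/carvana-workflows | .github/scripts/detect_rust_workspaces.py | _literal_prefix_for_anchor
-- ===== SOURCE A (Python) =====
-- def _literal_prefix_for_anchor(pattern: str) -> str:
--     """Return the literal path prefix before any glob meta characters."""
--     prefix = []
--     escape = False
--     for ch in pattern:
--         if escape:
--             prefix.append(ch)
--             escape = False
--             continue
--         if ch == "\\":
--             escape = True
--             continue
--         if ch in {"*", "?", "["}:
--             break
--         prefix.append(ch)
--     return "".join(prefix)
-- ===== SOURCE B (Python) =====
-- def _unescape(run):
--     """Drop the leading backslash of each escape pair in run."""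
--     out = []
--     j = 0
--     while j < len(run):
--         if run[j] == '\\':
--             out.append(run[j + 1:j + 2])
--             j += 2
--         else:
--             out.append(run[j])
--             j += 1
--     return ''.join(out)
--
--
-- def _literal_prefix_for_anchor(pattern: str) -> str:
--     """Return the literal path prefix before any glob meta characters."""
--     # Pass 1: find the cut index, consuming escape pairs atomically.
--     n = len(pattern)
--     i = 0
--     while i < n:
--         c = pattern[i]
--         if c == '\\':
--             if i + 1 >= n:
--                 break
--             i += 2
--         elif c in '*?[':
--             break
--         else:
--             i += 1
--     # Pass 2: un-escape the literal run.
--     return _unescape(pattern[:i])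
-- ===== Notes on version B (the rewrite author's own statement) =====
-- stated objective: alternative
-- what changed: Replaces the single-pass escape-flag state machine by two passes: an index scan that consumes escape pairs atomically to find the cut point, then a slice and a recursive un-escape of that run.
import Mathlib
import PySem

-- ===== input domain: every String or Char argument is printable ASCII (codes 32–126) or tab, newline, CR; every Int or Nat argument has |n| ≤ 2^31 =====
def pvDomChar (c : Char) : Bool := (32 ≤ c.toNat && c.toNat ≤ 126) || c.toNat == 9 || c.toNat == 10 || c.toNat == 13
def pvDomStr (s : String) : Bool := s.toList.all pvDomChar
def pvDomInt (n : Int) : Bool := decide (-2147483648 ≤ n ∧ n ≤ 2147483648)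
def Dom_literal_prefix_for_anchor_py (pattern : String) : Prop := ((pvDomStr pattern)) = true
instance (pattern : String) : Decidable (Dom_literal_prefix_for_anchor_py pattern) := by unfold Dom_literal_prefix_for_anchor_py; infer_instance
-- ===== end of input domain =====

-- B replaces A's escape-flag state machine by a cut-index scan plus a separate un-escape pass (alternative decomposition, same cost).

-- ===== PORT A =====
-- the for-loop of A: state = (escape flag, accumulated prefix); 'break' returns the accumulator
def pvLoopA : List Char → Bool → List Char → List Char
  | [], _, acc => acc
  | ch :: rest, escape, acc =>
    if escape then pvLoopA rest false (acc ++ [ch])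
    else if ch = '\\' then pvLoopA rest true acc
    else if ch = '*' ∨ ch = '?' ∨ ch = '[' then acc
    else pvLoopA rest false (acc ++ [ch])

def literal_prefix_for_anchor_py (pattern : String) : String :=
  String.mk (pvLoopA pattern.toList false [])

-- ===== PORT B =====
-- the while loop of Source B, scanning by index: recursion over the unscanned suffix,
-- consuming an escape pair (2 chars) or one plain char, stopping at an unescaped meta
-- char or a trailing lone backslash; returns the cut index i (exact for the index loop)
def pvCutLen : List Char → Nat
  | [] => 0
  | c :: rest =>
    if c = '\\' then
      match rest with
      | [] => 0
      | _ :: rest' => 2 + pvCutLen rest'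
    else if c = '*' ∨ c = '?' ∨ c = '[' then 0
    else 1 + pvCutLen rest

-- the while loop of _unescape, as recursion over the unscanned suffix of run;
-- run[j+1:j+2] is empty when the backslash is last, hence the [] case
def pvUnescape : List Char → List Char
  | [] => []
  | c :: rest =>
    if c = '\\' then
      match rest with
      | [] => []
      | d :: rest' => d :: pvUnescape rest'
    else c :: pvUnescape rest

def literal_prefix_for_anchor_py_alt (pattern : String) : String :=
  String.mk (pvUnescape (pattern.toList.take (pvCutLen pattern.toList)))

-- ===== PRECONDITION & SPEC =====
def Spec_literal_prefix_for_anchor_py (pattern : String) (out : String) : Prop := out = literal_prefix_for_anchor_py_alt pattern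
instance (pattern : String) (out : String) : Decidable (Spec_literal_prefix_for_anchor_py pattern out) := by unfold Spec_literal_prefix_for_anchor_py; infer_instance

-- ===== CLAIM (what is proved, stated in full; the proofs are below) =====
def Claim_equal_literal_prefix_for_anchor_py : Prop := ∀ (pattern : String), Dom_literal_prefix_for_anchor_py pattern → Spec_literal_prefix_for_anchor_py pattern (literal_prefix_for_anchor_py pattern)

-- ===== LEMMAS AND PROOFS =====

theorem pvUnescape_cons (c : Char) (l : List Char) (h : ¬ c = '\\') :
    pvUnescape (c :: l) = c :: pvUnescape l := by
  cases l <;> simp [pvUnescape, h]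

theorem pvCutLen_meta (c : Char) (l : List Char) (hb : ¬ c = '\\')
    (hm : c = '*' ∨ c = '?' ∨ c = '[') : pvCutLen (c :: l) = 0 := by
  cases l <;> simp [pvCutLen, hb, hm]

theorem pvCutLen_plain (c : Char) (l : List Char) (hb : ¬ c = '\\')
    (hm : ¬ (c = '*' ∨ c = '?' ∨ c = '[')) : pvCutLen (c :: l) = 1 + pvCutLen l := by
  cases l <;> simp [pvCutLen, hb, hm]

theorem pvUnescape_esc (d : Char) (l : List Char) :
    pvUnescape ('\\' :: d :: l) = d :: pvUnescape l := by
  simp [pvUnescape]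

-- A's loop (with the escape flag down) equals acc followed by B's two-pass result.
theorem pvLoopA_eq (n : ℕ) : ∀ (l : List Char), l.length ≤ n → ∀ (acc : List Char),
    pvLoopA l false acc = acc ++ pvUnescape (l.take (pvCutLen l)) := by
  induction n with
  | zero =>
    intro l hl acc
    have : l = [] := List.eq_nil_of_length_eq_zero (Nat.le_zero.mp hl)
    subst this
    simp [pvLoopA, pvCutLen, pvUnescape]
  | succ n ih =>
    intro l hl acc
    match l with
    | [] => simp [pvLoopA, pvCutLen, pvUnescape]
    | c :: rest =>
      by_cases hb : c = '\\'
      · subst hb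
        match rest with
        | [] => simp [pvLoopA, pvCutLen, pvUnescape]
        | d :: rest' =>
          have hlen : rest'.length ≤ n := by
            simp at hl; omega
          simp only [pvLoopA, pvCutLen, if_true]
          rw [show (2 + pvCutLen rest') = (pvCutLen rest' + 1) + 1 by omega]
          simp only [List.take_succ_cons, pvUnescape_esc]
          rw [ih rest' hlen (acc ++ [d])]
          simp
      · by_cases hm : c = '*' ∨ c = '?' ∨ c = '['
        · have hc : pvCutLen (c :: rest) = 0 := pvCutLen_meta c rest hb hm
          rw [hc]
          simp only [List.take_zero]
          simp [pvLoopA, hb, hm, pvUnescape]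
        · have hlen : rest.length ≤ n := by simp at hl; omega
          have hc : pvCutLen (c :: rest) = pvCutLen rest + 1 := by
            rw [pvCutLen_plain c rest hb hm]; omega
          rw [hc]
          simp only [pvLoopA, if_neg hb, if_neg hm, Bool.false_eq_true, if_false]
          simp only [List.take_succ_cons, pvUnescape_cons _ _ hb]
          rw [ih rest hlen (acc ++ [c])]
          simp

-- ===== VERDICT (by name: the statement is the Claim_ definition above) =====
theorem literal_prefix_for_anchor_py_spec : Claim_equal_literal_prefix_for_anchor_py := by
  intro pattern _
  unfold Spec_literal_prefix_for_anchor_py literal_prefix_for_anchor_py literal_prefix_for_anchor_py_alt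
  rw [pvLoopA_eq pattern.toList.length pattern.toList (le_refl _) []]
  simp
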